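-- pv_equiv track=rewrite | github.com/yuxin5343-arch/code | ai_models/api_server.py | _collect_domain_context
-- ===== SOURCE A (Python) =====
-- from collections import defaultdict
-- from typing import Any, Dict, List
--
-- def _collect_domain_context(alerts: List[Dict[str, Any]]) -> Dict[str, Dict[str, Any]]:
--     grouped: Dict[str, List[Dict[str, Any]]] = defaultdict(list)
--     for alert in alerts:
--         grouped[alert.get("domain", "unknown")].append(alert)
--
--     context: Dict[str, Dict[str, Any]] = {}
--     for domain, domain_alerts in grouped.items():
--         first = domain_alerts[0] if domain_alerts else {}
--         context[domain] = {
--             "src_ip": first.get("src_ip"),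
--             "dst_ip": first.get("dst_ip"),
--             "attack_type": first.get("attack_type", "unknown"),
--         }
--     return context
-- ===== SOURCE B (Python) =====
-- def _collect_domain_context(alerts):
--     context = {}
--     for alert in alerts:
--         domain = alert.get("domain", "unknown")
--         if domain not in context:
--             context[domain] = {
--                 "src_ip": alert.get("src_ip"),
--                 "dst_ip": alert.get("dst_ip"),
--                 "attack_type": alert.get("attack_type", "unknown"),
--             }
--     return context
-- ===== Notes on version B (the rewrite author's own statement) =====
-- stated objective: simpler
-- what changed: Single pass building the result dict directly with a first-seen guard, instead of grouping all alerts per domain into intermediate lists and then mapping over the groups.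
import Mathlib
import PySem

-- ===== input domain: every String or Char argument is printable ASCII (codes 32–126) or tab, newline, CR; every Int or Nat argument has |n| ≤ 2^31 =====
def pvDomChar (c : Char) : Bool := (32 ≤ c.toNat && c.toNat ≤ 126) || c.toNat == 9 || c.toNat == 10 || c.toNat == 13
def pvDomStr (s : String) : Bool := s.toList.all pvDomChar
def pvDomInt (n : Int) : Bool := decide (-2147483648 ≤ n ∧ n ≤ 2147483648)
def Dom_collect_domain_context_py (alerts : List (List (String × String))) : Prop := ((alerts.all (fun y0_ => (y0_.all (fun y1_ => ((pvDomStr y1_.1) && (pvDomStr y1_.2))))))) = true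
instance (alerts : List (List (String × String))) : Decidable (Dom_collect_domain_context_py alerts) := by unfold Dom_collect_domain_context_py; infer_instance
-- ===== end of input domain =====

-- B is a simpler single pass: it inserts the first alert's fields per domain directly
-- (first-seen wins), never building A's intermediate per-domain lists.

-- ===== PORT A =====
-- alert.get("domain", "unknown"); input dicts are association lists, lookup = first match
def pvKeyA (alert : List (String × String)) : String :=
  (List.lookup "domain" alert).getD "unknown"

-- the dict A stores under context[domain]: first = domain_alerts[0] if domain_alerts else {}
def pvCtxValA (domain_alerts : List (List (String × String))) : List (String × Option String) :=
  let first := domain_alerts.headD []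
  [("src_ip", List.lookup "src_ip" first),
   ("dst_ip", List.lookup "dst_ip" first),
   ("attack_type", some ((List.lookup "attack_type" first).getD "unknown"))]

def collect_domain_context_py (alerts : List (List (String × String))) : List (String × List (String × Option String)) :=
  let grouped : PySem.Dict String (List (List (String × String))) :=
    alerts.foldl (fun d alert => d.modify (pvKeyA alert) [] (· ++ [alert])) PySem.Dict.empty
  let context : PySem.Dict String (List (String × Option String)) :=
    grouped.items.foldl (fun c p => c.insert p.1 (pvCtxValA p.2)) PySem.Dict.empty
  context.items

-- ===== PORT B =====
def pvEntryB (alert : List (String × String)) : List (String × Option String) :=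
  [("src_ip", List.lookup "src_ip" alert),
   ("dst_ip", List.lookup "dst_ip" alert),
   ("attack_type", some ((List.lookup "attack_type" alert).getD "unknown"))]

def collect_domain_context_py_alt (alerts : List (List (String × String))) : List (String × List (String × Option String)) :=
  (alerts.foldl
    (fun c alert =>
      let domain := (List.lookup "domain" alert).getD "unknown"
      if c.contains domain then c else c.insert domain (pvEntryB alert))
    (PySem.Dict.empty : PySem.Dict String (List (String × Option String)))).items

-- ===== PRECONDITION & SPEC =====
def Spec_collect_domain_context_py (alerts : List (List (String × String))) (out : List (String × List (String × Option String))) : Prop := out = collect_domain_context_py_alt alerts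
instance (alerts : List (List (String × String))) (out : List (String × List (String × Option String))) : Decidable (Spec_collect_domain_context_py alerts out) := by unfold Spec_collect_domain_context_py; infer_instance

-- ===== CLAIM (what is proved, stated in full; the proofs are below) =====
def Claim_equal_collect_domain_context_py : Prop := ∀ (alerts : List (List (String × String))), Dom_collect_domain_context_py alerts → Spec_collect_domain_context_py alerts (collect_domain_context_py alerts)

-- ===== LEMMAS AND PROOFS =====

-- common characterisation: domains in first-seen order, each valued from the first alert of that domain
def pvChr (alerts : List (List (String × String))) : List (String × List (String × Option String)) :=
  (PySem.Set.ofList (alerts.map pvKeyA)).map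
    (fun k => (k, pvCtxValA (alerts.filter (fun a => pvKeyA a == k))))

theorem pvA_eq_chr (alerts : List (List (String × String))) :
    collect_domain_context_py alerts = pvChr alerts := by
  unfold collect_domain_context_py pvChr
  set grouped := alerts.foldl (fun d alert => d.modify (pvKeyA alert) [] (· ++ [alert])) PySem.Dict.empty with hg
  have hpairs : grouped = (alerts.map (fun a => (pvKeyA a, a))).foldl
      (fun d p => d.modify p.1 [] (· ++ [p.2])) PySem.Dict.empty := by
    rw [hg, List.foldl_map]
  have hnd : grouped.keys.Nodup := by
    rw [hg]
    exact PySem.Dict.nodup_keys_foldl_modify_key alerts pvKeyA [] (fun d a => (· ++ [a])) _ (by simp)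
  have hkeys : grouped.keys = PySem.Set.ofList (alerts.map pvKeyA) := by
    rw [hg, PySem.Dict.keys_foldl_modify_key]
    exact PySem.Set.update_nil_left _
  have hgetD : ∀ k, grouped.getD k [] = alerts.filter (fun a => pvKeyA a == k) := by
    intro k
    rw [hpairs, PySem.Dict.getD_foldl_modify_append]
    simp [List.filter_map, Function.comp_def]
  have hfresh : ∀ p ∈ grouped.items, (PySem.Dict.empty : PySem.Dict String (List (String × Option String))).contains p.1 = false := by
    simp
  have h1 : (grouped.items.foldl (fun c p => c.insert p.1 (pvCtxValA p.2))
      (PySem.Dict.empty : PySem.Dict String (List (String × Option String)))).items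
      = grouped.items.map (fun p => (p.1, pvCtxValA p.2)) := by
    rw [PySem.Dict.items_foldl_insert_fresh _ _ _ _ hfresh (by exact hnd)]
    rfl
  rw [h1, PySem.Dict.items_eq_map_keys grouped hnd [], List.map_map, hkeys]
  refine List.map_congr_left ?_
  intro k _
  simp [hgetD k]

theorem pv_mem_iff (alerts : List (List (String × String))) (k : String) :
    k ∈ PySem.Set.ofList (alerts.map pvKeyA) ↔ alerts.filter (fun a => pvKeyA a == k) ≠ [] := by
  simp [PySem.Set.mem_ofList, List.filter_eq_nil_iff]

theorem pvCtxValA_append (l t : List (List (String × String))) (h : l ≠ []) :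
    pvCtxValA (l ++ t) = pvCtxValA l := by
  cases l with
  | nil => exact absurd rfl h
  | cons x xs => rfl

theorem pvB_eq_chr (alerts : List (List (String × String))) :
    collect_domain_context_py_alt alerts = pvChr alerts := by
  induction alerts using List.reverseRecOn with
  | nil => rfl
  | append_singleton alerts a ih =>
    unfold collect_domain_context_py_alt at ih ⊢
    rw [List.foldl_append]
    set F := alerts.foldl
      (fun c alert =>
        let domain := (List.lookup "domain" alert).getD "unknown"
        if c.contains domain then c else c.insert domain (pvEntryB alert))
      (PySem.Dict.empty : PySem.Dict String (List (String × Option String))) with hF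
    have hkeys : F.keys = PySem.Set.ofList (alerts.map pvKeyA) := by
      simp only [PySem.Dict.keys, ih, pvChr, List.map_map]
      simp [Function.comp_def]
    have hka : (List.lookup "domain" a).getD "unknown" = pvKeyA a := rfl
    by_cases hk : pvKeyA a ∈ PySem.Set.ofList (alerts.map pvKeyA)
    · have hc : F.contains ((List.lookup "domain" a).getD "unknown") = true := by
        rw [hka, PySem.Dict.contains_eq_decide_mem_keys, hkeys]
        simpa using hk
      rw [List.foldl_cons, List.foldl_nil, if_pos hc]
      rw [ih]
      unfold pvChr
      simp only [List.map_append, List.map_cons, List.map_nil]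
      rw [PySem.Set.ofList_append_singleton, PySem.Set.add_of_mem hk]
      refine List.map_congr_left ?_
      intro k hkmem
      have hne : alerts.filter (fun a => pvKeyA a == k) ≠ [] := (pv_mem_iff alerts k).mp hkmem
      rw [List.filter_append, pvCtxValA_append _ _ hne]
    · have hc : F.contains ((List.lookup "domain" a).getD "unknown") = false := by
        rw [hka, PySem.Dict.contains_eq_decide_mem_keys, hkeys]
        simpa using hk
      rw [List.foldl_cons, List.foldl_nil, if_neg (by simp [hc])]
      rw [PySem.Dict.items_insert_of_not_contains _ _ hc, ih]
      unfold pvChr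
      simp only [List.map_append, List.map_cons, List.map_nil]
      rw [PySem.Set.ofList_append_singleton, PySem.Set.add_of_not_mem hk, List.map_append]
      congr 1
      · refine List.map_congr_left ?_
        intro k hkmem
        have hne : pvKeyA a ≠ k := by
          intro h; exact hk (h ▸ hkmem)
        have hb : (pvKeyA a == k) = false := beq_eq_false_iff_ne.mpr hne
        rw [List.filter_append]
        simp [List.filter, hb]
      · have hnil : alerts.filter (fun a' => pvKeyA a' == (pvKeyA a)) = [] := by
          by_contra h
          exact hk ((pv_mem_iff alerts (pvKeyA a)).mpr h)
        rw [hka]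
        simp [List.filter_append, hnil, List.filter]
        rfl

-- ===== VERDICT (by name: the statement is the Claim_ definition above) =====
theorem collect_domain_context_py_spec : Claim_equal_collect_domain_context_py := by
  intro alerts _
  unfold Spec_collect_domain_context_py
  rw [pvA_eq_chr, pvB_eq_chr]
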